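-- pv_equiv track=rewrite | github.com/star7gaurv/py-hvtbot-backend | api/complete_bot_api.py | get_error_from_output
-- ===== SOURCE A (Python) =====
-- def get_error_from_output(stdout_str: str, stderr_str: str, return_code: int) -> str:
--     """Extract meaningful error messages from process output"""
--     error_lines = []
--
--     # Common error patterns and their user-friendly messages
--     error_patterns = [
--         {"pattern": "API Key permission denied", "message": "API Key permission denied - check IP restrictions and API key permissions"},
--         {"pattern": "Invalid IP or permissions", "message": "API Key permission denied - check IP restrictions and API key permissions"},
--         {"pattern": "currency pair nonsupport", "message": "Trading pair not supported by the exchange - check if HVT_USDT is available on LBank"},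
--         {"pattern": "No such file or directory: 'py'", "message": "Python executable not found - install Python or check PATH"},
--         {"pattern": "Bot encountered an error", "message": None},  # Will use the actual error message
--         {"pattern": "Invalid response format from API", "message": "Invalid API response - check API credentials"},
--         {"pattern": "KeyError: 'data'", "message": "API response format error - the exchange returned unexpected data format"},
--         {"pattern": "Error:", "message": None},  # Will use the actual error message
--         {"pattern": "Failed to start bot:", "message": None}  # Will use the actual error message
--     ]
--
--     # Look for known error patterns first
--     if stdout_str:
--         for line in stdout_str.split('\n'):
--             for pattern in error_patterns:
--                 if pattern["pattern"] in line:
--                     # Use the custom message if provided, otherwise use the actual line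
--                     error_msg = pattern["message"] if pattern["message"] else line.strip()
--                     return error_msg
--
--     # Look for API errors specifically
--     api_errors = []
--     if stdout_str:
--         for line in stdout_str.split('\n'):
--             if ("Invalid response format from API" in line or "API Key" in line or
--                 "error_code" in line or "permission denied" in line or
--                 "currency pair nonsupport" in line):
--                 api_errors.append(line.strip())
--
--     if api_errors:
--         return '; '.join(api_errors[:2])
--
--     # Look for other error messages
--     if stdout_str:
--         for line in stdout_str.split('\n'):
--             if ('error' in line.lower() or 'failed' in line.lower() or
--                 'exception' in line.lower() or 'traceback' in line.lower() or
--                 'nonsupport' in line.lower() or 'denied' in line.lower() or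
--                 'keyerror' in line.lower()):
--                 error_lines.append(line.strip())
--
--     if stderr_str:
--         for line in stderr_str.split('\n'):
--             if line.strip():
--                 error_lines.append(line.strip())
--
--     if error_lines:
--         return '; '.join(error_lines[:3])  # Take first 3 error lines
--     else:
--         return f"Bot process exited with code {return_code}"
-- ===== SOURCE B (Python) =====
-- _PATTERNS = [
--     ("API Key permission denied", "API Key permission denied - check IP restrictions and API key permissions"),
--     ("Invalid IP or permissions", "API Key permission denied - check IP restrictions and API key permissions"),
--     ("currency pair nonsupport", "Trading pair not supported by the exchange - check if HVT_USDT is available on LBank"),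
--     ("No such file or directory: 'py'", "Python executable not found - install Python or check PATH"),
--     ("Bot encountered an error", None),
--     ("Invalid response format from API", "Invalid API response - check API credentials"),
--     ("KeyError: 'data'", "API response format error - the exchange returned unexpected data format"),
--     ("Error:", None),
--     ("Failed to start bot:", None),
-- ]
-- _API_KEYS = ("Invalid response format from API", "API Key", "error_code",
--              "permission denied", "currency pair nonsupport")
-- _BROAD_KEYS = ("error", "failed", "exception", "traceback", "nonsupport",
--                "denied", "keyerror")
--
--
-- def get_error_from_output(stdout_str: str, stderr_str: str, return_code: int) -> str:
--     """Single pass over stdout: return immediately on a known pattern,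
--     otherwise collect capped API-error and broad-error accumulators on the fly."""
--     api_errors, error_lines = [], []
--     for line in (stdout_str.split('\n') if stdout_str else []):
--         for pat, msg in _PATTERNS:
--             if pat in line:
--                 return msg if msg is not None else line.strip()
--         if len(api_errors) < 2 and any(k in line for k in _API_KEYS):
--             api_errors.append(line.strip())
--         if len(error_lines) < 3 and any(k in line.lower() for k in _BROAD_KEYS):
--             error_lines.append(line.strip())
--     if api_errors:
--         return '; '.join(api_errors)
--     if stderr_str:
--         for line in stderr_str.split('\n'):
--             if len(error_lines) >= 3:
--                 break
--             if line.strip():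
--                 error_lines.append(line.strip())
--     if error_lines:
--         return '; '.join(error_lines)
--     return f"Bot process exited with code {return_code}"
-- ===== Notes on version B (the rewrite author's own statement) =====
-- stated objective: alternative
-- what changed: Three separate full scans of stdout lines (pattern search, API-error collection, broad-error collection) are replaced by one single pass that returns early on a pattern hit and maintains two capped accumulators (2 API errors, 3 broad errors), with stderr collection also stopping at the cap instead of slicing afterwards.
import Mathlib
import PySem

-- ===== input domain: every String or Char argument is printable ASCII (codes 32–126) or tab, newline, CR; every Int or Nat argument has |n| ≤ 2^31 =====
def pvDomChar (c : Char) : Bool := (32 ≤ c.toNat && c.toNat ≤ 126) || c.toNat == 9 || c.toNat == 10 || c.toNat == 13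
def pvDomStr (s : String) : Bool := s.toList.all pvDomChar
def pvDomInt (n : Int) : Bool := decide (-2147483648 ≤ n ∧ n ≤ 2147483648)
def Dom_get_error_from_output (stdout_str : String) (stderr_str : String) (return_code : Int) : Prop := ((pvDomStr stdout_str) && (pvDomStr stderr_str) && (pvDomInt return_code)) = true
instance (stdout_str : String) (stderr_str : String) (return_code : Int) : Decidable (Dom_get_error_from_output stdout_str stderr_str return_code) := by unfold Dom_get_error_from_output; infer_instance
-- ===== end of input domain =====

-- B replaces A's three separate scans of the stdout lines by one single pass with an early
-- return on a pattern hit and two capped accumulators; same output (objective: alternative).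

-- ===== PORT A =====
-- shared module-level data (the same literal tables appear in Source A and Source B);
-- 'message': None is ported as Option; the custom messages are non-empty, so Python's
-- truthiness test on them coincides with the is-None test / Option.getD.
def pvPatterns : List (String × Option String) := [
  ("API Key permission denied", some "API Key permission denied - check IP restrictions and API key permissions"),
  ("Invalid IP or permissions", some "API Key permission denied - check IP restrictions and API key permissions"),
  ("currency pair nonsupport", some "Trading pair not supported by the exchange - check if HVT_USDT is available on LBank"),
  ("No such file or directory: 'py'", some "Python executable not found - install Python or check PATH"),
  ("Bot encountered an error", none),
  ("Invalid response format from API", some "Invalid API response - check API credentials"),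
  ("KeyError: 'data'", some "API response format error - the exchange returned unexpected data format"),
  ("Error:", none),
  ("Failed to start bot:", none)]

-- s.split('\n')  (split? with a non-empty separator never returns none)
def pvLines (s : String) : List String := (PySem.Str.split? s "\n").getD []

-- the or-chain of the second Python loop
def pvApiCond (line : String) : Bool :=
  PySem.Str.isIn "Invalid response format from API" line || PySem.Str.isIn "API Key" line ||
  PySem.Str.isIn "error_code" line || PySem.Str.isIn "permission denied" line ||
  PySem.Str.isIn "currency pair nonsupport" line

-- the or-chain of the third Python loop (each clause lowercases the line, as Python does)
def pvBroadCond (line : String) : Bool :=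
  PySem.Str.isIn "error" (PySem.Str.lower line) || PySem.Str.isIn "failed" (PySem.Str.lower line) ||
  PySem.Str.isIn "exception" (PySem.Str.lower line) || PySem.Str.isIn "traceback" (PySem.Str.lower line) ||
  PySem.Str.isIn "nonsupport" (PySem.Str.lower line) || PySem.Str.isIn "denied" (PySem.Str.lower line) ||
  PySem.Str.isIn "keyerror" (PySem.Str.lower line)

-- A's first double loop: the first line containing a pattern decides the early return
def pvFindPatternA (lines : List String) : Option String :=
  match lines with
  | [] => none
  | l :: ls =>
    match pvPatterns.find? (fun p => PySem.Str.isIn p.1 l) with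
    | some p => some (p.2.getD (PySem.Str.strip l))
    | none => pvFindPatternA ls

def get_error_from_output (stdout_str : String) (stderr_str : String) (return_code : Int) : String :=
  match (if stdout_str ≠ "" then pvFindPatternA (pvLines stdout_str) else none) with
  | some r => r
  | none =>
    let api_errors : List String :=
      if stdout_str ≠ "" then
        (pvLines stdout_str).foldl
          (fun acc l => if pvApiCond l then acc ++ [PySem.Str.strip l] else acc) []
      else []
    if api_errors ≠ [] then PySem.Str.join "; " (api_errors.take 2)
    else
      let error_lines : List String :=
        if stdout_str ≠ "" then
          (pvLines stdout_str).foldl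
            (fun acc l => if pvBroadCond l then acc ++ [PySem.Str.strip l] else acc) []
        else []
      let error_lines2 : List String :=
        if stderr_str ≠ "" then
          (pvLines stderr_str).foldl
            (fun acc l => if PySem.Str.strip l != "" then acc ++ [PySem.Str.strip l] else acc) error_lines
        else error_lines
      if error_lines2 ≠ [] then PySem.Str.join "; " (error_lines2.take 3)
      else "Bot process exited with code " ++ PySem.Int.toStr return_code

-- ===== PORT B =====
-- stderr collection that stops as soon as 3 lines are held (Source B's 'break')
def pvStderrB (lines : List String) (acc : List String) : List String :=
  match lines with
  | [] => acc
  | l :: ls =>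
    if 3 ≤ acc.length then acc
    else if PySem.Str.strip l != "" then pvStderrB ls (acc ++ [PySem.Str.strip l])
    else pvStderrB ls acc

def pvFinishB (api broad : List String) (stderr_str : String) (return_code : Int) : String :=
  if api ≠ [] then PySem.Str.join "; " api
  else
    let broad2 := if stderr_str ≠ "" then pvStderrB (pvLines stderr_str) broad else broad
    if broad2 ≠ [] then PySem.Str.join "; " broad2
    else "Bot process exited with code " ++ PySem.Int.toStr return_code

-- the single pass: early return on a pattern hit, else capped accumulation (Source B's main loop)
def pvGoB (lines : List String) (api broad : List String) (stderr_str : String) (return_code : Int) : String :=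
  match lines with
  | [] => pvFinishB api broad stderr_str return_code
  | l :: ls =>
    match pvPatterns.find? (fun p => PySem.Str.isIn p.1 l) with
    | some p => p.2.getD (PySem.Str.strip l)
    | none =>
      let api' := if api.length < 2 &&
                     [("Invalid response format from API":String), "API Key", "error_code",
                      "permission denied", "currency pair nonsupport"].any
                       (fun k => PySem.Str.isIn k l) then api ++ [PySem.Str.strip l] else api
      let broad' := if broad.length < 3 &&
                     [("error":String), "failed", "exception", "traceback", "nonsupport",
                      "denied", "keyerror"].any
                       (fun k => PySem.Str.isIn k (PySem.Str.lower l)) then broad ++ [PySem.Str.strip l] else broad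
      pvGoB ls api' broad' stderr_str return_code

def get_error_from_output_alt (stdout_str : String) (stderr_str : String) (return_code : Int) : String :=
  pvGoB (if stdout_str ≠ "" then pvLines stdout_str else []) [] [] stderr_str return_code

-- ===== PRECONDITION & SPEC =====
def Spec_get_error_from_output (stdout_str : String) (stderr_str : String) (return_code : Int) (out : String) : Prop := out = get_error_from_output_alt stdout_str stderr_str return_code
instance (stdout_str : String) (stderr_str : String) (return_code : Int) (out : String) : Decidable (Spec_get_error_from_output stdout_str stderr_str return_code out) := by unfold Spec_get_error_from_output; infer_instance

-- ===== CLAIM (what is proved, stated in full; the proofs are below) =====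
def Claim_equal_get_error_from_output : Prop := ∀ (stdout_str : String) (stderr_str : String) (return_code : Int), Dom_get_error_from_output stdout_str stderr_str return_code → Spec_get_error_from_output stdout_str stderr_str return_code (get_error_from_output stdout_str stderr_str return_code)

-- ===== LEMMAS AND PROOFS =====

-- capped append: acc extended by xs but never beyond n elements
def pvCapApp (n : Nat) (acc xs : List String) : List String := acc ++ xs.take (n - acc.length)

theorem pvCapApp_nil (n : Nat) (acc : List String) : pvCapApp n acc [] = acc := by
  simp [pvCapApp]

theorem pvCapApp_ge (n : Nat) (acc xs : List String) (h : n ≤ acc.length) :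
    pvCapApp n acc xs = acc := by
  have h0 : n - acc.length = 0 := by omega
  simp [pvCapApp, h0]

theorem pvCapApp_cons_lt (n : Nat) (acc xs : List String) (x : String) (h : acc.length < n) :
    pvCapApp n acc (x :: xs) = pvCapApp n (acc ++ [x]) xs := by
  have h1 : n - acc.length = (n - (acc.length + 1)) + 1 := by omega
  simp [pvCapApp, h1, List.take_succ_cons]

theorem pvCapApp_cons_ge (n : Nat) (acc xs : List String) (x : String) (h : ¬ acc.length < n) :
    pvCapApp n acc (x :: xs) = pvCapApp n acc xs := by
  rw [pvCapApp_ge n acc _ (by omega), pvCapApp_ge n acc _ (by omega)]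

theorem pvCapApp_take (xs ys : List String) :
    pvCapApp 3 (xs.take 3) ys = (xs ++ ys).take 3 := by
  simp only [pvCapApp, List.take_append, List.length_take]
  have h : 3 - min 3 xs.length = 3 - xs.length := by omega
  rw [h]

-- one step of capped accumulation = capped append of the filtered head
theorem pvCapStep (n : Nat) (acc : List String) (c : Bool) (x : String) (rest : List String) :
    pvCapApp n (if (decide (acc.length < n) && c) = true then acc ++ [x] else acc) rest
    = pvCapApp n acc (if c = true then x :: rest else rest) := by
  by_cases hc : c = true
  · by_cases hl : acc.length < n
    · rw [if_pos (by simp [hc, hl]), if_pos hc, pvCapApp_cons_lt n acc rest x hl]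
    · rw [if_neg (by simp [hl]), if_pos hc, pvCapApp_cons_ge n acc rest x hl]
  · rw [if_neg (by simp [hc]), if_neg hc]

-- B's inlined any-chains are A's helper conditions
theorem pvAnyApi_eq (l : String) :
    ([("Invalid response format from API":String), "API Key", "error_code",
      "permission denied", "currency pair nonsupport"].any (fun k => PySem.Str.isIn k l))
    = pvApiCond l := by
  simp [pvApiCond, List.any, Bool.or_assoc]

theorem pvAnyBroad_eq (l : String) :
    ([("error":String), "failed", "exception", "traceback", "nonsupport",
      "denied", "keyerror"].any (fun k => PySem.Str.isIn k (PySem.Str.lower l)))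
    = pvBroadCond l := by
  simp [pvBroadCond, List.any, Bool.or_assoc]

-- the stripped non-blank stderr lines
def pvStderrAll (S : List String) : List String :=
  (S.filter (fun l => PySem.Str.strip l != "")).map PySem.Str.strip

theorem pvStderrB_eq (S : List String) : ∀ acc, pvStderrB S acc = pvCapApp 3 acc (pvStderrAll S) := by
  induction S with
  | nil => intro acc; simp [pvStderrB, pvStderrAll, pvCapApp_nil]
  | cons l ls ih =>
    intro acc
    by_cases h3 : 3 ≤ acc.length
    · rw [pvStderrB]
      simp only [h3, if_true]
      rw [pvCapApp_ge 3 acc _ h3]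
    · rw [pvStderrB]
      simp only [h3, if_false]
      by_cases hb : PySem.Str.strip l != ""
      · simp only [hb, if_true, ih]
        have hall : pvStderrAll (l :: ls) = PySem.Str.strip l :: pvStderrAll ls := by
          simp [pvStderrAll, hb]
        rw [hall, pvCapApp_cons_lt 3 acc _ _ (by omega)]
      · have hb' : PySem.Str.strip l = "" := by simpa using hb
        have hall : pvStderrAll (l :: ls) = pvStderrAll ls := by
          simp [pvStderrAll, hb']
        rw [if_neg hb, ih, hall]

-- the single pass equals: early pattern return, else finish on the capped filtered lists
theorem pvGoB_eq (ls : List String) : ∀ (api broad : List String) (se : String) (rc : Int),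
    pvGoB ls api broad se rc =
      match pvFindPatternA ls with
      | some r => r
      | none => pvFinishB (pvCapApp 2 api ((ls.filter pvApiCond).map PySem.Str.strip))
                          (pvCapApp 3 broad ((ls.filter pvBroadCond).map PySem.Str.strip)) se rc := by
  induction ls with
  | nil => intro api broad se rc; simp [pvGoB, pvFindPatternA, pvCapApp_nil]
  | cons l ls ih =>
    intro api broad se rc
    rw [pvGoB, pvFindPatternA]
    cases hf : pvPatterns.find? (fun p => PySem.Str.isIn p.1 l) with
    | some p => rfl
    | none =>
      simp only [pvAnyApi_eq, pvAnyBroad_eq, ih]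
      cases hfp : pvFindPatternA ls with
      | some r => rfl
      | none =>
        simp only []
        have hfa : (List.filter pvApiCond (l :: ls)).map PySem.Str.strip =
            if pvApiCond l = true then PySem.Str.strip l :: (List.filter pvApiCond ls).map PySem.Str.strip
            else (List.filter pvApiCond ls).map PySem.Str.strip := by
          by_cases hc : pvApiCond l <;> simp [hc]
        have hfb : (List.filter pvBroadCond (l :: ls)).map PySem.Str.strip =
            if pvBroadCond l = true then PySem.Str.strip l :: (List.filter pvBroadCond ls).map PySem.Str.strip
            else (List.filter pvBroadCond ls).map PySem.Str.strip := by
          by_cases hc : pvBroadCond l <;> simp [hc]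
        rw [pvCapStep 2 api (pvApiCond l) (PySem.Str.strip l),
            pvCapStep 3 broad (pvBroadCond l) (PySem.Str.strip l), ← hfa, ← hfb]

theorem pvTake_ne_nil (n : Nat) (hn : n ≠ 0) (xs : List String) : (xs.take n ≠ []) ↔ xs ≠ [] := by
  rw [not_iff_not, List.take_eq_nil_iff]
  exact ⟨fun h => h.resolve_left hn, Or.inr⟩

-- final-stage agreement: A's tail code after a pattern miss equals pvFinishB on the capped lists
theorem pvFinish_eq (L : List String) (se : String) (rc : Int) :
    (if ((L.filter pvApiCond).map PySem.Str.strip) ≠ [] then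
       PySem.Str.join "; " (((L.filter pvApiCond).map PySem.Str.strip).take 2)
     else
       if (if se ≠ "" then ((L.filter pvBroadCond).map PySem.Str.strip) ++ pvStderrAll (pvLines se)
           else (L.filter pvBroadCond).map PySem.Str.strip) ≠ [] then
         PySem.Str.join "; " ((if se ≠ "" then ((L.filter pvBroadCond).map PySem.Str.strip) ++ pvStderrAll (pvLines se)
             else (L.filter pvBroadCond).map PySem.Str.strip).take 3)
       else "Bot process exited with code " ++ PySem.Int.toStr rc)
    = pvFinishB (pvCapApp 2 [] ((L.filter pvApiCond).map PySem.Str.strip))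
                (pvCapApp 3 [] ((L.filter pvBroadCond).map PySem.Str.strip)) se rc := by
  have hcap2 : pvCapApp 2 [] ((L.filter pvApiCond).map PySem.Str.strip)
      = ((L.filter pvApiCond).map PySem.Str.strip).take 2 := by simp [pvCapApp]
  have hcap3 : pvCapApp 3 [] ((L.filter pvBroadCond).map PySem.Str.strip)
      = ((L.filter pvBroadCond).map PySem.Str.strip).take 3 := by simp [pvCapApp]
  rw [hcap2, hcap3]
  simp only [pvFinishB]
  by_cases hse : se ≠ ""
  · rw [if_pos hse, if_pos hse, pvStderrB_eq, pvCapApp_take]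
    by_cases ha : ((L.filter pvApiCond).map PySem.Str.strip) = []
    · conv_lhs => rw [if_neg (not_not_intro ha)]
      conv_rhs => rw [if_neg (not_not_intro (by simp [ha]))]
      by_cases hne : ((L.filter pvBroadCond).map PySem.Str.strip) ++ pvStderrAll (pvLines se) = []
      · conv_lhs => rw [if_neg (not_not_intro hne)]
        conv_rhs => rw [if_neg (not_not_intro (by simp [hne]))]
      · conv_lhs => rw [if_pos hne]
        conv_rhs => rw [if_pos ((pvTake_ne_nil 3 (by omega) _).mpr hne)]
    · conv_lhs => rw [if_pos ha]
      conv_rhs => rw [if_pos ((pvTake_ne_nil 2 (by omega) _).mpr ha)]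
  · rw [if_neg hse, if_neg hse]
    by_cases ha : ((L.filter pvApiCond).map PySem.Str.strip) = []
    · conv_lhs => rw [if_neg (not_not_intro ha)]
      conv_rhs => rw [if_neg (not_not_intro (by simp [ha]))]
      by_cases hne : ((L.filter pvBroadCond).map PySem.Str.strip) = []
      · conv_lhs => rw [if_neg (not_not_intro hne)]
        conv_rhs => rw [if_neg (not_not_intro (by simp [hne]))]
      · conv_lhs => rw [if_pos hne]
        conv_rhs => rw [if_pos ((pvTake_ne_nil 3 (by omega) _).mpr hne)]
    · conv_lhs => rw [if_pos ha]
      conv_rhs => rw [if_pos ((pvTake_ne_nil 2 (by omega) _).mpr ha)]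

-- ===== VERDICT (by name: the statement is the Claim_ definition above) =====
theorem get_error_from_output_spec : Claim_equal_get_error_from_output := by
  intro so se rc _
  unfold Spec_get_error_from_output get_error_from_output get_error_from_output_alt
  by_cases h : so ≠ ""
  · simp only [if_pos h]
    rw [pvGoB_eq]
    cases hf : pvFindPatternA (pvLines so) with
    | some r => rfl
    | none =>
      simp only [PySem.List.foldl_append_if, List.nil_append]
      exact pvFinish_eq (pvLines so) se rc
  · simp only [if_neg h]
    rw [pvGoB_eq]
    simp only [pvFindPatternA]
    simp only [PySem.List.foldl_append_if, List.nil_append, List.filter_nil, List.map_nil]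
    exact pvFinish_eq [] se rc
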